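-- pv_equiv track=rewrite | github.com/wedlaken/listener-maths-crossword | scripts/puzzle_visualizer.py | generate_clues_html
-- ===== SOURCE A (Python) =====
-- from typing import Dict, Tuple, List, Optional
--
-- def create_clue_id(number: int, direction: str) -> str:
--     """Create unique clue ID like 'A1', 'D1'"""
--     prefix = "A" if direction == "ACROSS" else "D"
--     return f"{prefix}{number}"
--
-- def generate_clues_html(clue_params: Dict[Tuple[int, str], Tuple[int, int, int]],
--                        solved_clues: Dict[str, int] = None) -> str:
--     """Generate HTML for the clues section."""
--
--     if solved_clues is None:
--         solved_clues = {}
--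
--     clues_html = []
--     clues_html.append('<div class="clues-section">')
--
--     # Across clues
--     clues_html.append('  <div class="clues-column">')
--     clues_html.append('    <h3>Across</h3>')
--
--     across_clues = []
--     for (number, direction), (a, b, c) in clue_params.items():
--         if direction == "ACROSS":
--             clue_id = create_clue_id(number, direction)
--             if clue_id in solved_clues:
--                 across_clues.append((number, f'      <div class="clue solved">{number}. {solved_clues[clue_id]}</div>'))
--             elif b == 0 and c == 0:
--                 across_clues.append((number, f'      <div class="clue unclued">{number}. Unclued</div>'))
--             else:
--                 across_clues.append((number, f'      <div class="clue">{number}. b={b}, c={c}</div>'))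
--
--     across_clues.sort(key=lambda x: x[0])
--     clues_html.extend([clue_html for _, clue_html in across_clues])
--     clues_html.append('  </div>')
--
--     # Down clues
--     clues_html.append('  <div class="clues-column">')
--     clues_html.append('    <h3>Down</h3>')
--
--     down_clues = []
--     for (number, direction), (a, b, c) in clue_params.items():
--         if direction == "DOWN":
--             clue_id = create_clue_id(number, direction)
--             if clue_id in solved_clues:
--                 down_clues.append((number, f'      <div class="clue solved">{number}. {solved_clues[clue_id]}</div>'))
--             elif b == 0 and c == 0:
--                 down_clues.append((number, f'      <div class="clue unclued">{number}. Unclued</div>'))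
--             else:
--                 down_clues.append((number, f'      <div class="clue">{number}. b={b}, c={c}</div>'))
--
--     down_clues.sort(key=lambda x: x[0])
--     clues_html.extend([clue_html for _, clue_html in down_clues])
--     clues_html.append('  </div>')
--
--     clues_html.append('</div>')
--
--     return '\n'.join(clues_html)
-- ===== SOURCE B (Python) =====
-- def generate_clues_html(clue_params, solved_clues=None):
--     """One partitioning pass over the items with a shared formatting rule,
--     then a stable per-group sort and a single list assembly."""
--     if solved_clues is None:
--         solved_clues = {}
--     across, down = [], []
--     for (number, direction), (a, b, c) in clue_params.items():
--         if direction not in ("ACROSS", "DOWN"):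
--             continue
--         clue_id = ("A" if direction == "ACROSS" else "D") + str(number)
--         if clue_id in solved_clues:
--             cls, body = "clue solved", f"{number}. {solved_clues[clue_id]}"
--         elif b == 0 and c == 0:
--             cls, body = "clue unclued", f"{number}. Unclued"
--         else:
--             cls, body = "clue", f"{number}. b={b}, c={c}"
--         line = f'      <div class="{cls}">{body}</div>'
--         (across if direction == "ACROSS" else down).append((number, line))
--     across.sort(key=lambda t: t[0])
--     down.sort(key=lambda t: t[0])
--     parts = ['<div class="clues-section">',
--              '  <div class="clues-column">',
--              '    <h3>Across</h3>',
--              *(line for _, line in across),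
--              '  </div>',
--              '  <div class="clues-column">',
--              '    <h3>Down</h3>',
--              *(line for _, line in down),
--              '  </div>',
--              '</div>']
--     return '\n'.join(parts)
-- ===== Notes on version B (the rewrite author's own statement) =====
-- stated objective: simpler
-- what changed: B replaces A's two separate filtered scans over the items (with the three-way formatting duplicated per direction) by one partitioning pass with a single shared formatting rule, then sorts each group and assembles the output list in one expression.
import Mathlib
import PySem

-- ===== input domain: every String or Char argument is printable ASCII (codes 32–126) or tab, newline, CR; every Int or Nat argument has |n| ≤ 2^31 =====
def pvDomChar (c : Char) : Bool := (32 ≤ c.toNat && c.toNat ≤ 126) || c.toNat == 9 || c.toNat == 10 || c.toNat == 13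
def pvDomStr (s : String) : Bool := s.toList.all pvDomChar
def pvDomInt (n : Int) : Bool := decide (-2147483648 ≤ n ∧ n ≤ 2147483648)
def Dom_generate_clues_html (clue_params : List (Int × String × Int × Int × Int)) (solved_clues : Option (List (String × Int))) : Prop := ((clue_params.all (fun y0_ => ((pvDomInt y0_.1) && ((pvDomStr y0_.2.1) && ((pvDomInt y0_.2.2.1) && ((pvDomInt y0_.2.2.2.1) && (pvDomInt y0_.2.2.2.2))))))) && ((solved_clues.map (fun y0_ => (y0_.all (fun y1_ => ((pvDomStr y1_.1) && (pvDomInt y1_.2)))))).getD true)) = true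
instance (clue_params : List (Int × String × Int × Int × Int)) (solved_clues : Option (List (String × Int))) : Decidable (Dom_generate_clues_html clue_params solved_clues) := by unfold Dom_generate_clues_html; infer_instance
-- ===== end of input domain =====

-- B makes ONE partitioning pass over the items with a shared formatting rule (A scans the items twice,
-- once per direction, with the formatting duplicated); objective: simpler. Same return value everywhere.

-- ===== PORT A =====
-- both ports decode the dict arguments the same way: the association list is read as the Python dict it encodes
def create_clue_id (number : Int) (direction : String) : String :=
  let pfx := if direction == "ACROSS" then "A" else "D"
  pfx ++ PySem.Int.toStr number

-- loop body of A's "Across" for-loop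
def gchStepA (solved : PySem.Dict String Int) (acc : List (Int × String))
    (it : (Int × String) × (Int × Int × Int)) : List (Int × String) :=
  let number := it.1.1
  let direction := it.1.2
  let b := it.2.2.1
  let c := it.2.2.2
  if direction == "ACROSS" then
    let clue_id := create_clue_id number direction
    match solved.get? clue_id with
    | some v => acc ++ [(number, "      <div class=\"clue solved\">" ++ PySem.Int.toStr number ++ ". " ++ PySem.Int.toStr v ++ "</div>")]
    | none =>
      if b == 0 && c == 0 then
        acc ++ [(number, "      <div class=\"clue unclued\">" ++ PySem.Int.toStr number ++ ". Unclued</div>")]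
      else
        acc ++ [(number, "      <div class=\"clue\">" ++ PySem.Int.toStr number ++ ". b=" ++ PySem.Int.toStr b ++ ", c=" ++ PySem.Int.toStr c ++ "</div>")]
  else acc

-- loop body of A's "Down" for-loop
def gchStepD (solved : PySem.Dict String Int) (acc : List (Int × String))
    (it : (Int × String) × (Int × Int × Int)) : List (Int × String) :=
  let number := it.1.1
  let direction := it.1.2
  let b := it.2.2.1
  let c := it.2.2.2
  if direction == "DOWN" then
    let clue_id := create_clue_id number direction
    match solved.get? clue_id with
    | some v => acc ++ [(number, "      <div class=\"clue solved\">" ++ PySem.Int.toStr number ++ ". " ++ PySem.Int.toStr v ++ "</div>")]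
    | none =>
      if b == 0 && c == 0 then
        acc ++ [(number, "      <div class=\"clue unclued\">" ++ PySem.Int.toStr number ++ ". Unclued</div>")]
      else
        acc ++ [(number, "      <div class=\"clue\">" ++ PySem.Int.toStr number ++ ". b=" ++ PySem.Int.toStr b ++ ", c=" ++ PySem.Int.toStr c ++ "</div>")]
  else acc

def generate_clues_html (clue_params : List (Int × String × Int × Int × Int)) (solved_clues : Option (List (String × Int))) : String :=
  let solved : PySem.Dict String Int := PySem.Dict.ofList (solved_clues.getD [])
  let items : List ((Int × String) × (Int × Int × Int)) :=
    (PySem.Dict.ofList (clue_params.map (fun t => ((t.1, t.2.1), (t.2.2.1, t.2.2.2.1, t.2.2.2.2))))).items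
  let clues_html : List String := []
  let clues_html := clues_html ++ ["<div class=\"clues-section\">"]
  let clues_html := clues_html ++ ["  <div class=\"clues-column\">"]
  let clues_html := clues_html ++ ["    <h3>Across</h3>"]
  let across_clues := items.foldl (gchStepA solved) []
  let across_clues := PySem.List.sorted across_clues (fun x => x.1) false
  let clues_html := clues_html ++ across_clues.map (fun p => p.2)
  let clues_html := clues_html ++ ["  </div>"]
  let clues_html := clues_html ++ ["  <div class=\"clues-column\">"]
  let clues_html := clues_html ++ ["    <h3>Down</h3>"]
  let down_clues := items.foldl (gchStepD solved) []
  let down_clues := PySem.List.sorted down_clues (fun x => x.1) false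
  let clues_html := clues_html ++ down_clues.map (fun p => p.2)
  let clues_html := clues_html ++ ["  </div>"]
  let clues_html := clues_html ++ ["</div>"]
  PySem.Str.join "\n" clues_html

-- ===== PORT B =====
-- loop body of B's single partitioning pass
def gchStepAlt (solved : PySem.Dict String Int) (acc : List (Int × String) × List (Int × String))
    (it : (Int × String) × (Int × Int × Int)) : List (Int × String) × List (Int × String) :=
  let number := it.1.1
  let direction := it.1.2
  let b := it.2.2.1
  let c := it.2.2.2
  if direction == "ACROSS" || direction == "DOWN" then
    let clue_id := (if direction == "ACROSS" then "A" else "D") ++ PySem.Int.toStr number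
    let cb : String × String :=
      match solved.get? clue_id with
      | some v => ("clue solved", PySem.Int.toStr number ++ ". " ++ PySem.Int.toStr v)
      | none =>
        if b == 0 && c == 0 then ("clue unclued", PySem.Int.toStr number ++ ". Unclued")
        else ("clue", PySem.Int.toStr number ++ ". b=" ++ PySem.Int.toStr b ++ ", c=" ++ PySem.Int.toStr c)
    let line := "      <div class=\"" ++ cb.1 ++ "\">" ++ cb.2 ++ "</div>"
    if direction == "ACROSS" then (acc.1 ++ [(number, line)], acc.2)
    else (acc.1, acc.2 ++ [(number, line)])
  else acc

def generate_clues_html_alt (clue_params : List (Int × String × Int × Int × Int)) (solved_clues : Option (List (String × Int))) : String :=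
  let solved : PySem.Dict String Int := PySem.Dict.ofList (solved_clues.getD [])
  let items : List ((Int × String) × (Int × Int × Int)) :=
    (PySem.Dict.ofList (clue_params.map (fun t => ((t.1, t.2.1), (t.2.2.1, t.2.2.2.1, t.2.2.2.2))))).items
  let acc := items.foldl (gchStepAlt solved) ([], [])
  let across := PySem.List.sorted acc.1 (fun t => t.1) false
  let down := PySem.List.sorted acc.2 (fun t => t.1) false
  PySem.Str.join "\n"
    (["<div class=\"clues-section\">", "  <div class=\"clues-column\">", "    <h3>Across</h3>"]
      ++ across.map (fun t => t.2)
      ++ ["  </div>", "  <div class=\"clues-column\">", "    <h3>Down</h3>"]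
      ++ down.map (fun t => t.2)
      ++ ["  </div>", "</div>"])

-- ===== PRECONDITION & SPEC =====
def Spec_generate_clues_html (clue_params : List (Int × String × Int × Int × Int)) (solved_clues : Option (List (String × Int))) (out : String) : Prop := out = generate_clues_html_alt clue_params solved_clues
instance (clue_params : List (Int × String × Int × Int × Int)) (solved_clues : Option (List (String × Int))) (out : String) : Decidable (Spec_generate_clues_html clue_params solved_clues out) := by unfold Spec_generate_clues_html; infer_instance

-- ===== CLAIM (what is proved, stated in full; the proofs are below) =====
def Claim_equal_generate_clues_html : Prop := ∀ (clue_params : List (Int × String × Int × Int × Int)) (solved_clues : Option (List (String × Int))), Dom_generate_clues_html clue_params solved_clues → Spec_generate_clues_html clue_params solved_clues (generate_clues_html clue_params solved_clues)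

-- ===== LEMMAS AND PROOFS =====

-- the common entry both programs build for one item, with prefix pfx ("A" or "D")
def gchEntry (solved : PySem.Dict String Int) (pfx : String)
    (it : (Int × String) × (Int × Int × Int)) : Int × String :=
  let number := it.1.1
  let b := it.2.2.1
  let c := it.2.2.2
  match solved.get? (pfx ++ PySem.Int.toStr number) with
  | some v => (number, "      <div class=\"clue solved\">" ++ PySem.Int.toStr number ++ ". " ++ PySem.Int.toStr v ++ "</div>")
  | none =>
    if b == 0 && c == 0 then (number, "      <div class=\"clue unclued\">" ++ PySem.Int.toStr number ++ ". Unclued</div>")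
    else (number, "      <div class=\"clue\">" ++ PySem.Int.toStr number ++ ". b=" ++ PySem.Int.toStr b ++ ", c=" ++ PySem.Int.toStr c ++ "</div>")

theorem gchStepA_foldl (solved : PySem.Dict String Int)
    (l : List ((Int × String) × (Int × Int × Int))) (acc : List (Int × String)) :
    l.foldl (gchStepA solved) acc
      = acc ++ (l.filter (fun it => it.1.2 == "ACROSS")).map (gchEntry solved "A") := by
  induction l generalizing acc with
  | nil => simp
  | cons it tl ih =>
    by_cases h : it.1.2 = "ACROSS"
    · simp only [List.foldl_cons, List.filter_cons, h, gchStepA, create_clue_id, ih]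
      cases h2 : solved.get? ("A" ++ PySem.Int.toStr it.1.1) <;>
        by_cases h3 : (it.2.2.1 = 0 ∧ it.2.2.2 = 0) <;>
        simp [h2, h3, List.append_assoc, gchEntry]
    · have hb : (it.1.2 == "ACROSS") = false := by simp [h]
      simp only [List.foldl_cons, List.filter_cons, hb, gchStepA, ih]
      simp

theorem gchStepD_foldl (solved : PySem.Dict String Int)
    (l : List ((Int × String) × (Int × Int × Int))) (acc : List (Int × String)) :
    l.foldl (gchStepD solved) acc
      = acc ++ (l.filter (fun it => it.1.2 == "DOWN")).map (gchEntry solved "D") := by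
  induction l generalizing acc with
  | nil => simp
  | cons it tl ih =>
    by_cases h : it.1.2 = "DOWN"
    · simp only [List.foldl_cons, List.filter_cons, h, gchStepD, create_clue_id, ih]
      cases h2 : solved.get? ("D" ++ PySem.Int.toStr it.1.1) <;>
        by_cases h3 : (it.2.2.1 = 0 ∧ it.2.2.2 = 0) <;>
        simp [h2, h3, List.append_assoc, gchEntry]
    · have hb : (it.1.2 == "DOWN") = false := by simp [h]
      simp only [List.foldl_cons, List.filter_cons, hb, gchStepD, ih]
      simp

theorem gchStepAlt_foldl (solved : PySem.Dict String Int)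
    (l : List ((Int × String) × (Int × Int × Int)))
    (a0 d0 : List (Int × String)) :
    l.foldl (gchStepAlt solved) (a0, d0)
      = (a0 ++ (l.filter (fun it => it.1.2 == "ACROSS")).map (gchEntry solved "A"),
         d0 ++ (l.filter (fun it => it.1.2 == "DOWN")).map (gchEntry solved "D")) := by
  induction l generalizing a0 d0 with
  | nil => simp
  | cons it tl ih =>
    by_cases hA : it.1.2 = "ACROSS"
    · simp only [List.foldl_cons, List.filter_cons, hA, gchStepAlt, ih]
      cases h : solved.get? ("A" ++ PySem.Int.toStr it.1.1) <;>
        simp [h, List.append_assoc, gchEntry, ← String.append_assoc] <;>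
        split <;> simp [← String.append_assoc] <;> simp [String.append_assoc]
    · by_cases hD : it.1.2 = "DOWN"
      · simp only [List.foldl_cons, List.filter_cons, hD, gchStepAlt, ih]
        cases h : solved.get? ("D" ++ PySem.Int.toStr it.1.1) <;>
          simp [h, List.append_assoc, gchEntry, ← String.append_assoc] <;>
          split <;> simp [← String.append_assoc] <;> simp [String.append_assoc]
      · have hbA : (it.1.2 == "ACROSS") = false := by simp [hA]
        have hbD : (it.1.2 == "DOWN") = false := by simp [hD]
        simp only [List.foldl_cons, List.filter_cons, hbA, hbD, gchStepAlt, ih]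
        simp

-- ===== VERDICT (by name: the statement is the Claim_ definition above) =====
theorem generate_clues_html_spec : Claim_equal_generate_clues_html := by
  intro clue_params solved_clues _
  show generate_clues_html clue_params solved_clues = generate_clues_html_alt clue_params solved_clues
  simp only [generate_clues_html, generate_clues_html_alt, gchStepA_foldl, gchStepD_foldl,
    gchStepAlt_foldl]
  simp [List.append_assoc]
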